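-- pv_equiv track=rewrite | github.com/prosysscience/GSACO | benchmark_instances/aco_networkX/analysis.py | calculate_idle_times
-- ===== SOURCE A (Python) =====
-- def calculate_idle_times(job_times, machine_assignments):
--     # Group jobs by machine
--     jobs_by_machine = {}
--     for job_step, machine in machine_assignments.items():
--         machine_id = machine[2]
--         if machine_id not in jobs_by_machine:
--             jobs_by_machine[machine_id] = []
--         jobs_by_machine[machine_id].append((job_times[job_step]['start'], job_times[job_step]['end'], job_step))
--
--     # Sort jobs by start time for each machine
--     for machine_id in jobs_by_machine:
--         jobs_by_machine[machine_id].sort()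
--
--     # Calculate idle times for each machine
--     idle_times = {machine: [] for machine in jobs_by_machine}
--     for machine_id, jobs in jobs_by_machine.items():
--         end_time = 0
--         for start, finish, job_step in jobs:
--             if start > end_time:  # Gap detected, machine is idle
--                 idle_times[machine_id].append((end_time, start))
--             end_time = max(end_time, finish)  # Update the last job end time
--
--     return idle_times
-- ===== SOURCE B (Python) =====
-- def calculate_idle_times(job_times, machine_assignments):
--     # Group jobs by machine (same grouping as the original)
--     jobs_by_machine = {}
--     for job_step, machine in machine_assignments.items():
--         jobs_by_machine.setdefault(machine[2], []).append(
--             (job_times[job_step]['start'], job_times[job_step]['end'], job_step))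
--
--     result = {}
--     for machine_id, jobs in jobs_by_machine.items():
--         jobs.sort()
--         # Phase 1: merge the sorted jobs into maximal busy blocks
--         blocks = []
--         for start, finish, _ in jobs:
--             if blocks and start <= blocks[-1][1]:
--                 bs, be = blocks[-1]
--                 blocks[-1] = (bs, max(be, finish))
--             else:
--                 blocks.append((start, finish))
--         # Phase 2: walk the blocks, measuring gaps from coverage starting at 0
--         gaps = []
--         cov = 0
--         for bs, be in blocks:
--             if bs > cov:
--                 gaps.append((cov, bs))
--             cov = max(cov, be)
--         result[machine_id] = gaps
--     return result
-- ===== Notes on version B (the rewrite author's own statement) =====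
-- stated objective: alternative
-- what changed: Instead of the inline running-max scan over the raw sorted jobs, B first merges each machine's sorted jobs into maximal busy blocks and then derives the idle gaps in a second pass over the blocks with coverage starting at 0.
import Mathlib
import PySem

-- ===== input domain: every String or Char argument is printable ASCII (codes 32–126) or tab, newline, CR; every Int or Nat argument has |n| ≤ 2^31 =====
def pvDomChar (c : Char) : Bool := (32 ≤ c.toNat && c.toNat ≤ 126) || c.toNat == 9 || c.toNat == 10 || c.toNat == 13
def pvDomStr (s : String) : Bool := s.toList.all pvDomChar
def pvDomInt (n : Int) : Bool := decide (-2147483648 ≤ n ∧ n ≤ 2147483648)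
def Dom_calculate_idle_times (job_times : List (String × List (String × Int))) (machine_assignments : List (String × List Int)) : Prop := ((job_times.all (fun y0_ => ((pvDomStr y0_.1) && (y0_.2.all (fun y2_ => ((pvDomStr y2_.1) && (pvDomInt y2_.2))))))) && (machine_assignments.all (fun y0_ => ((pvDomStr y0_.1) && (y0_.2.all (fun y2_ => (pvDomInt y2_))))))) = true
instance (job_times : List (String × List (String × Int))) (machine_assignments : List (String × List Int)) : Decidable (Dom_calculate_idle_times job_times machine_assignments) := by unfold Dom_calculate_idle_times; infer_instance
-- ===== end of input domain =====

-- B merges each machine's sorted jobs into maximal busy blocks and reads the idle gaps off the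
-- block list in a second pass (alternative decomposition; return values proved equal on Pre_).

-- ===== PORT A =====

-- Python tuples (start, end, job_step) compare lexicographically: the sort key, in a Lex type
def pvKey (t : Int × Int × String) : Lex (Int × Lex (Int × String)) := toLex (t.1, toLex (t.2.1, t.2.2))

-- one iteration of A's grouping loop; the `none` fallthroughs are Python raises, excluded by Pre_
def pvGroupStepA (jtD : PySem.Dict String (PySem.Dict String Int))
    (d : PySem.Dict Int (List (Int × Int × String))) (p : String × List Int) :
    PySem.Dict Int (List (Int × Int × String)) :=
  match PySem.List.pyGet? p.2 2 with
  | none => d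
  | some mid =>
    match (jtD.get? p.1).bind (fun jr => jr.get? "start"),
          (jtD.get? p.1).bind (fun jr => jr.get? "end") with
    | some s, some e =>
      (if d.contains mid then d else d.insert mid []).modify mid [] (fun l => l ++ [(s, e, p.1)])
    | _, _ => (if d.contains mid then d else d.insert mid [])

-- one iteration of A's inner idle-time loop (state: end_time × idle_times dict)
def pvIdleStep (mid : Int) (st : Int × PySem.Dict Int (List (Int × Int))) (job : Int × Int × String) :
    Int × PySem.Dict Int (List (Int × Int)) :=
  (max st.1 job.2.1,
   if job.1 > st.1 then st.2.modify mid [] (fun l => l ++ [(st.1, job.1)]) else st.2)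

def calculate_idle_times (job_times : List (String × List (String × Int))) (machine_assignments : List (String × List Int)) : List (Int × List (Int × Int)) :=
  let jtD : PySem.Dict String (PySem.Dict String Int) :=
    PySem.Dict.ofList (job_times.map (fun p => (p.1, PySem.Dict.ofList p.2)))
  let jbm := (PySem.Dict.ofList machine_assignments).items.foldl (pvGroupStepA jtD) PySem.Dict.empty
  let jbmS : PySem.Dict Int (List (Int × Int × String)) :=
    PySem.Dict.mk (jbm.items.map (fun q => (q.1, PySem.List.sorted q.2 pvKey false)))
  let it0 : PySem.Dict Int (List (Int × Int)) := PySem.Dict.mk (jbmS.items.map (fun q => (q.1, [])))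
  (jbmS.items.foldl (fun (acc : PySem.Dict Int (List (Int × Int))) q =>
      (q.2.foldl (pvIdleStep q.1) (0, acc)).2) it0).items

-- ===== PORT B =====

-- one iteration of B's grouping loop (setdefault-based; same raise fallthroughs outside Pre_)
def pvGroupStepB (jtD : PySem.Dict String (PySem.Dict String Int))
    (d : PySem.Dict Int (List (Int × Int × String))) (p : String × List Int) :
    PySem.Dict Int (List (Int × Int × String)) :=
  match PySem.List.pyGet? p.2 2 with
  | none => d
  | some mid =>
    match (jtD.get? p.1).bind (fun jr => jr.get? "start"),
          (jtD.get? p.1).bind (fun jr => jr.get? "end") with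
    | some s, some e => (d.setdefault mid []).modify mid [] (fun l => l ++ [(s, e, p.1)])
    | _, _ => d.setdefault mid []

-- B phase 1: merge sorted jobs into maximal busy blocks (state: open block × closed blocks)
def pvMergeStep (st : Option (Int × Int) × List (Int × Int)) (job : Int × Int × String) :
    Option (Int × Int) × List (Int × Int) :=
  match st.1 with
  | some cur =>
    if job.1 ≤ cur.2 then (some (cur.1, max cur.2 job.2.1), st.2)
    else (some (job.1, job.2.1), st.2 ++ [cur])
  | none => (some (job.1, job.2.1), st.2)

-- close the open block at the end of the loop ('if cur is not None: blocks.append(cur)')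
def pvBlocksFin (st : Option (Int × Int) × List (Int × Int)) : List (Int × Int) :=
  match st.1 with
  | some cur => st.2 ++ [cur]
  | none => st.2

def pvBlocks (jobs : List (Int × Int × String)) : List (Int × Int) :=
  pvBlocksFin (jobs.foldl pvMergeStep (none, []))

-- B phase 2: walk the blocks, coverage starting at 0 (state: coverage × gaps)
def pvGapStep (st : Int × List (Int × Int)) (b : Int × Int) : Int × List (Int × Int) :=
  (max st.1 b.2, if b.1 > st.1 then st.2 ++ [(st.1, b.1)] else st.2)

def pvGaps (blocks : List (Int × Int)) : List (Int × Int) :=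
  (blocks.foldl pvGapStep (0, [])).2

def calculate_idle_times_alt (job_times : List (String × List (String × Int))) (machine_assignments : List (String × List Int)) : List (Int × List (Int × Int)) :=
  let jtD : PySem.Dict String (PySem.Dict String Int) :=
    PySem.Dict.ofList (job_times.map (fun p => (p.1, PySem.Dict.ofList p.2)))
  let jbm := (PySem.Dict.ofList machine_assignments).items.foldl (pvGroupStepB jtD) PySem.Dict.empty
  (jbm.items.foldl (fun (acc : PySem.Dict Int (List (Int × Int))) q =>
      acc.insert q.1 (pvGaps (pvBlocks (PySem.List.sorted q.2 pvKey false)))) PySem.Dict.empty).items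

-- ===== PRECONDITION & SPEC =====
-- Pre_ excludes exactly the inputs on which the Python A raises: a machine list with fewer than
-- 3 entries (IndexError on machine[2]), a job_step missing from job_times (KeyError), or a job
-- record without a 'start' or 'end' key (KeyError).
def Pre_calculate_idle_times (job_times : List (String × List (String × Int))) (machine_assignments : List (String × List Int)) : Prop :=
  ∀ p ∈ (PySem.Dict.ofList machine_assignments).items,
    PySem.Raise.InRange p.2.length 2 ∧
    ((((PySem.Dict.ofList (job_times.map (fun q => (q.1, PySem.Dict.ofList q.2)))).get? p.1).map
        (fun jr => jr.contains "start" && jr.contains "end")).getD false = true)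
instance (job_times : List (String × List (String × Int))) (machine_assignments : List (String × List Int)) : Decidable (Pre_calculate_idle_times job_times machine_assignments) := by unfold Pre_calculate_idle_times; infer_instance

def pvWitness_calculate_idle_times : (List (String × List (String × Int))) × (List (String × List Int)) :=
  ([("a", [("start", 1), ("end", 3)]), ("b", [("start", 5), ("end", 6)])],
   [("a", [0, 0, 1]), ("b", [0, 0, 1])])

def Spec_calculate_idle_times (job_times : List (String × List (String × Int))) (machine_assignments : List (String × List Int)) (out : List (Int × List (Int × Int))) : Prop := out = calculate_idle_times_alt job_times machine_assignments
instance (job_times : List (String × List (String × Int))) (machine_assignments : List (String × List Int)) (out : List (Int × List (Int × Int))) : Decidable (Spec_calculate_idle_times job_times machine_assignments out) := by unfold Spec_calculate_idle_times; infer_instance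

-- ===== CLAIM (what is proved, stated in full; the proofs are below) =====
def Claim_equal_calculate_idle_times : Prop := ∀ (job_times : List (String × List (String × Int))) (machine_assignments : List (String × List Int)), Dom_calculate_idle_times job_times machine_assignments → Pre_calculate_idle_times job_times machine_assignments → Spec_calculate_idle_times job_times machine_assignments (calculate_idle_times job_times machine_assignments)

-- ===== LEMMAS AND PROOFS =====

-- A's inner scan, written recursively: gaps emitted over a job list from end_time e
def pvAScan : Int → List (Int × Int × String) → List (Int × Int)
  | _, [] => []
  | e, j :: r => (if j.1 > e then [(e, j.1)] else []) ++ pvAScan (max e j.2.1) r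

-- final end_time of A's inner scan
def pvAMax : Int → List (Int × Int × String) → Int
  | e, [] => e
  | e, j :: r => pvAMax (max e j.2.1) r

-- B's block walk, written recursively
def pvBScan : Int → List (Int × Int) → List (Int × Int)
  | _, [] => []
  | e, b :: r => (if b.1 > e then [(e, b.1)] else []) ++ pvBScan (max e b.2) r

-- B's merge with an open current block, written recursively
def pvMergeGo : Int × Int → List (Int × Int × String) → List (Int × Int)
  | cur, [] => [cur]
  | cur, j :: r =>
    if j.1 ≤ cur.2 then pvMergeGo (cur.1, max cur.2 j.2.1) r else cur :: pvMergeGo (j.1, j.2.1) r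

-- the two grouping steps agree
theorem pvGroupStep_eq (jtD : PySem.Dict String (PySem.Dict String Int))
    (d : PySem.Dict Int (List (Int × Int × String))) (p : String × List Int) :
    pvGroupStepA jtD d p = pvGroupStepB jtD d p := by
  unfold pvGroupStepA pvGroupStepB
  cases hp : PySem.List.pyGet? p.2 2 with
  | none => rfl
  | some mid =>
    have hd : (if d.contains mid then d else d.insert mid []) = d.setdefault mid [] := by
      by_cases hc : d.contains mid = true
      · simp [PySem.Dict.setdefault, hc]
      · simp only [Bool.not_eq_true] at hc
        simp [PySem.Dict.setdefault, PySem.Dict.insert, hc]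
    cases hs : (jtD.get? p.1).bind (fun jr => jr.get? "start") with
    | none => cases he : (jtD.get? p.1).bind (fun jr => jr.get? "end") <;> exact hd
    | some s =>
      cases he : (jtD.get? p.1).bind (fun jr => jr.get? "end") with
      | none => exact hd
      | some e => exact congrArg (fun x => PySem.Dict.modify x mid [] (fun l => l ++ [(s, e, p.1)])) hd

-- B's merge loop equals the recursive merge
theorem pvBlocksFin_foldl (jobs : List (Int × Int × String)) :
    ∀ (cur : Int × Int) (bl : List (Int × Int)),
      pvBlocksFin (jobs.foldl pvMergeStep (some cur, bl)) = bl ++ pvMergeGo cur jobs := by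
  induction jobs with
  | nil => intro cur bl; simp [pvBlocksFin, pvMergeGo]
  | cons j r ih =>
    intro cur bl
    simp only [List.foldl_cons]
    by_cases h : j.1 ≤ cur.2
    · rw [show pvMergeStep (some cur, bl) j = (some (cur.1, max cur.2 j.2.1), bl) from by
        simp [pvMergeStep, h]]
      rw [ih]
      simp [pvMergeGo, h]
    · rw [show pvMergeStep (some cur, bl) j = (some (j.1, j.2.1), bl ++ [cur]) from by
        simp [pvMergeStep, h]]
      rw [ih]
      simp [pvMergeGo, h, List.append_assoc]

theorem pvBlocks_cons (j : Int × Int × String) (r : List (Int × Int × String)) :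
    pvBlocks (j :: r) = pvMergeGo (j.1, j.2.1) r := by
  unfold pvBlocks
  simp only [List.foldl_cons]
  rw [show pvMergeStep (none, []) j = (some (j.1, j.2.1), []) from rfl, pvBlocksFin_foldl]
  simp

-- the core fact: walking the merged blocks emits exactly A's gaps
theorem pvBScan_mergeGo (r : List (Int × Int × String)) :
    ∀ (cur : Int × Int) (e : Int),
      pvBScan e (pvMergeGo cur r) = (if cur.1 > e then [(e, cur.1)] else []) ++ pvAScan (max e cur.2) r := by
  induction r with
  | nil => intro cur e; simp [pvMergeGo, pvBScan, pvAScan]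
  | cons j r ih =>
    intro cur e
    by_cases h : j.1 ≤ cur.2
    · rw [show pvMergeGo cur (j :: r) = pvMergeGo (cur.1, max cur.2 j.2.1) r from by
        simp [pvMergeGo, h]]
      rw [ih]
      have h1 : ¬ (j.1 > max e cur.2) := by
        have := le_max_right e cur.2; omega
      simp [pvAScan, h1, max_assoc]
    · rw [show pvMergeGo cur (j :: r) = cur :: pvMergeGo (j.1, j.2.1) r from by
        simp [pvMergeGo, h]]
      simp only [pvBScan]
      rw [ih]
      simp [pvAScan]

theorem pvGapStep_foldl (blocks : List (Int × Int)) :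
    ∀ (e : Int) (acc : List (Int × Int)),
      (blocks.foldl pvGapStep (e, acc)).2 = acc ++ pvBScan e blocks := by
  induction blocks with
  | nil => intro e acc; simp [pvBScan]
  | cons b r ih =>
    intro e acc
    simp only [List.foldl_cons, pvGapStep]
    by_cases h : b.1 > e
    · simp [h, ih, pvBScan, List.append_assoc]
    · simp [h, ih, pvBScan]

theorem pvGaps_pvBlocks (jobs : List (Int × Int × String)) :
    pvGaps (pvBlocks jobs) = pvAScan 0 jobs := by
  cases jobs with
  | nil => rfl
  | cons j r =>
    rw [pvBlocks_cons]
    unfold pvGaps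
    rw [pvGapStep_foldl, pvBScan_mergeGo]
    simp [pvAScan]

-- A's inner fold in closed form
theorem pvIdleStep_foldl (jobs : List (Int × Int × String)) :
    ∀ (mid e : Int) (d : PySem.Dict Int (List (Int × Int))),
      jobs.foldl (pvIdleStep mid) (e, d) =
        (pvAMax e jobs, (pvAScan e jobs).foldl (fun d g => d.modify mid [] (fun l => l ++ [g])) d) := by
  induction jobs with
  | nil => intro mid e d; simp [pvAScan, pvAMax]
  | cons j r ih =>
    intro mid e d
    simp only [List.foldl_cons]
    by_cases h : j.1 > e
    · rw [show pvIdleStep mid (e, d) j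
          = (max e j.2.1, d.modify mid [] (fun l => l ++ [(e, j.1)])) from by simp [pvIdleStep, h]]
      rw [ih]
      simp [pvAScan, pvAMax, h]
    · rw [show pvIdleStep mid (e, d) j = (max e j.2.1, d) from by simp [pvIdleStep, h]]
      rw [ih]
      simp [pvAScan, pvAMax, h]

theorem pvModifyFold_getD_self (gs : List (Int × Int)) (mid : Int) :
    ∀ (d : PySem.Dict Int (List (Int × Int))),
      ((gs.foldl (fun d g => d.modify mid [] (fun l => l ++ [g])) d).getD mid []) = d.getD mid [] ++ gs := by
  induction gs with
  | nil => intro d; simp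
  | cons g r ih =>
    intro d
    simp only [List.foldl_cons]
    rw [ih, PySem.Dict.getD_modify_self]
    simp

theorem pvModifyFold_getD_ne (gs : List (Int × Int)) (mid k : Int) (h : k ≠ mid) :
    ∀ (d : PySem.Dict Int (List (Int × Int))),
      ((gs.foldl (fun d g => d.modify mid [] (fun l => l ++ [g])) d).getD k []) = d.getD k [] := by
  induction gs with
  | nil => intro d; rfl
  | cons g r ih =>
    intro d
    simp only [List.foldl_cons]
    rw [ih, PySem.Dict.getD_modify_of_ne _ _ _ h]

theorem pvModifyFold_keys (gs : List (Int × Int)) (mid : Int) :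
    ∀ (d : PySem.Dict Int (List (Int × Int))), d.contains mid = true →
      (gs.foldl (fun d g => d.modify mid [] (fun l => l ++ [g])) d).keys = d.keys := by
  induction gs with
  | nil => intro d _; rfl
  | cons g r ih =>
    intro d hc
    simp only [List.foldl_cons]
    have h1 : (d.modify mid [] (fun l => l ++ [g])).keys = d.keys := by
      simp only [PySem.Dict.modify]
      exact PySem.Dict.keys_insert_of_contains d _ hc
    have h2 : (d.modify mid [] (fun l => l ++ [g])).contains mid = true := by
      simp only [PySem.Dict.modify]
      exact PySem.Dict.contains_insert_self d mid _
    rw [ih _ h2, h1]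

-- the outer fold of A's third pass preserves the key list
theorem pvOuterA_keys (items : List (Int × List (Int × Int × String))) :
    ∀ (acc : PySem.Dict Int (List (Int × Int))), (∀ q ∈ items, acc.contains q.1 = true) →
      (items.foldl (fun acc q => (q.2.foldl (pvIdleStep q.1) (0, acc)).2) acc).keys = acc.keys := by
  induction items with
  | nil => intro acc _; rfl
  | cons q t ih =>
    intro acc h
    simp only [List.foldl_cons]
    have hstep : (q.2.foldl (pvIdleStep q.1) (0, acc)).2
        = (pvAScan 0 q.2).foldl (fun d g => d.modify q.1 [] (fun l => l ++ [g])) acc := by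
      rw [pvIdleStep_foldl]
    have hk : ((q.2.foldl (pvIdleStep q.1) (0, acc)).2).keys = acc.keys := by
      rw [hstep]
      exact pvModifyFold_keys _ _ _ (h q (by simp))
    have hcont : ∀ q' ∈ t, ((q.2.foldl (pvIdleStep q.1) (0, acc)).2).contains q'.1 = true := by
      intro q' hq'
      rw [PySem.Dict.contains_iff_mem_keys, hk, ← PySem.Dict.contains_iff_mem_keys]
      exact h q' (by simp [hq'])
    rw [ih _ hcont, hk]

theorem pvOuterA_getD_ne (items : List (Int × List (Int × Int × String))) :
    ∀ (acc : PySem.Dict Int (List (Int × Int))) (k : Int), k ∉ items.map (fun x => x.1) →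
      (items.foldl (fun acc q => (q.2.foldl (pvIdleStep q.1) (0, acc)).2) acc).getD k [] = acc.getD k [] := by
  induction items with
  | nil => intro acc k _; rfl
  | cons q t ih =>
    intro acc k hk
    simp only [List.map_cons, List.mem_cons, not_or] at hk
    obtain ⟨h1, h2⟩ := hk
    simp only [List.foldl_cons]
    rw [ih _ _ h2]
    have hstep : (q.2.foldl (pvIdleStep q.1) (0, acc)).2
        = (pvAScan 0 q.2).foldl (fun d g => d.modify q.1 [] (fun l => l ++ [g])) acc := by
      rw [pvIdleStep_foldl]
    rw [hstep, pvModifyFold_getD_ne _ _ _ h1]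

theorem pvOuterA_getD (items : List (Int × List (Int × Int × String))) :
    ∀ (acc : PySem.Dict Int (List (Int × Int))), (items.map (fun x => x.1)).Nodup →
      (∀ q ∈ items, acc.getD q.1 [] = [] ∧ acc.contains q.1 = true) →
      ∀ q ∈ items,
        (items.foldl (fun acc q => (q.2.foldl (pvIdleStep q.1) (0, acc)).2) acc).getD q.1 [] = pvAScan 0 q.2 := by
  induction items with
  | nil => intro acc _ _ q hq; simp at hq
  | cons p t ih =>
    intro acc hnd hinit q hq
    simp only [List.map_cons, List.nodup_cons] at hnd
    obtain ⟨hp1, hndt⟩ := hnd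
    have hstep : (p.2.foldl (pvIdleStep p.1) (0, acc)).2
        = (pvAScan 0 p.2).foldl (fun d g => d.modify p.1 [] (fun l => l ++ [g])) acc := by
      rw [pvIdleStep_foldl]
    simp only [List.foldl_cons]
    rcases List.mem_cons.mp hq with heq | hq'
    · subst heq
      rw [pvOuterA_getD_ne t ((q.2.foldl (pvIdleStep q.1) (0, acc)).2) q.1 hp1, hstep,
        pvModifyFold_getD_self (pvAScan 0 q.2) q.1 acc, (hinit q (by simp)).1]
      simp
    · refine ih _ hndt ?_ q hq'
      intro q' hq2
      have hne : q'.1 ≠ p.1 := by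
        intro hcontra
        exact hp1 (by rw [← hcontra]; exact List.mem_map.mpr ⟨q', hq2, rfl⟩)
      refine ⟨?_, ?_⟩
      · rw [hstep, pvModifyFold_getD_ne (pvAScan 0 p.2) p.1 q'.1 hne acc]
        exact (hinit q' (by simp [hq2])).1
      · rw [PySem.Dict.contains_iff_mem_keys, hstep,
          pvModifyFold_keys (pvAScan 0 p.2) p.1 acc (hinit p (by simp)).2,
          ← PySem.Dict.contains_iff_mem_keys]
        exact (hinit q' (by simp [hq2])).2

-- B's result fold: inserting fresh keys appends the items in order
theorem pvInsertFold_items (f : Int × List (Int × Int × String) → List (Int × Int))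
    (items : List (Int × List (Int × Int × String))) :
    ∀ (acc : PySem.Dict Int (List (Int × Int))), (items.map (fun x => x.1)).Nodup →
      (∀ q ∈ items, acc.contains q.1 = false) →
      (items.foldl (fun acc q => acc.insert q.1 (f q)) acc).items = acc.items ++ items.map (fun q => (q.1, f q)) := by
  induction items with
  | nil => intro acc _ _; simp
  | cons q t ih =>
    intro acc hnd hfresh
    simp only [List.map_cons, List.nodup_cons] at hnd
    obtain ⟨hq1, hndt⟩ := hnd
    simp only [List.foldl_cons]
    have hfresh' : ∀ q' ∈ t, (acc.insert q.1 (f q)).contains q'.1 = false := by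
      intro q' hq'
      rw [PySem.Dict.contains_insert]
      have hne : q'.1 ≠ q.1 := by
        intro hcontra
        exact hq1 (by rw [← hcontra]; exact List.mem_map.mpr ⟨q', hq', rfl⟩)
      simp [hne, hfresh q' (by simp [hq'])]
    rw [ih _ hndt hfresh',
      PySem.Dict.items_insert_of_not_contains acc (f q) (hfresh q (by simp))]
    simp [List.append_assoc]

-- grouping keeps the key list Nodup
theorem pvGroup_nodup (jtD : PySem.Dict String (PySem.Dict String Int)) (ps : List (String × List Int)) :
    ∀ (d : PySem.Dict Int (List (Int × Int × String))), d.keys.Nodup →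
      (ps.foldl (pvGroupStepB jtD) d).keys.Nodup := by
  induction ps with
  | nil => intro d h; exact h
  | cons p t ih =>
    intro d h
    simp only [List.foldl_cons]
    apply ih
    unfold pvGroupStepB
    cases hp : PySem.List.pyGet? p.2 2 with
    | none => exact h
    | some mid =>
      have hd1 : (d.setdefault mid []).keys.Nodup := by
        by_cases hc : d.contains mid = true
        · simpa [PySem.Dict.setdefault, hc] using h
        · simp only [Bool.not_eq_true] at hc
          have he : d.setdefault mid [] = d.insert mid [] := by
            simp [PySem.Dict.setdefault, PySem.Dict.insert, hc]
          rw [he]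
          exact PySem.Dict.nodup_keys_insert d mid [] h
      cases hs : (jtD.get? p.1).bind (fun jr => jr.get? "start") with
      | none => cases he2 : (jtD.get? p.1).bind (fun jr => jr.get? "end") <;> exact hd1
      | some s =>
        cases he2 : (jtD.get? p.1).bind (fun jr => jr.get? "end") with
        | none => exact hd1
        | some e =>
          simp only [PySem.Dict.modify]
          exact PySem.Dict.nodup_keys_insert _ _ _ hd1

-- the whole pipeline, with the grouping input abstracted
theorem pvMain (jtD : PySem.Dict String (PySem.Dict String Int)) (ps : List (String × List Int)) :
    (((ps.foldl (pvGroupStepA jtD) PySem.Dict.empty).items.map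
        (fun q => (q.1, PySem.List.sorted q.2 pvKey false))).foldl
      (fun (acc : PySem.Dict Int (List (Int × Int))) q => (q.2.foldl (pvIdleStep q.1) (0, acc)).2)
      (PySem.Dict.mk (((ps.foldl (pvGroupStepA jtD) PySem.Dict.empty).items.map
        (fun q => (q.1, PySem.List.sorted q.2 pvKey false))).map (fun q => (q.1, ([] : List (Int × Int))))))).items
    = ((ps.foldl (pvGroupStepB jtD) PySem.Dict.empty).items.foldl
        (fun (acc : PySem.Dict Int (List (Int × Int))) q =>
          acc.insert q.1 (pvGaps (pvBlocks (PySem.List.sorted q.2 pvKey false)))) PySem.Dict.empty).items := by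
  have hAB : pvGroupStepA jtD = pvGroupStepB jtD :=
    funext fun d => funext fun p => pvGroupStep_eq jtD d p
  rw [hAB]
  set jbm := ps.foldl (pvGroupStepB jtD) PySem.Dict.empty with hjbm
  set itemsS := jbm.items.map (fun q => (q.1, PySem.List.sorted q.2 pvKey false)) with hitemsS
  set it0 := PySem.Dict.mk (itemsS.map (fun q => (q.1, ([] : List (Int × Int))))) with hit0
  set itF := itemsS.foldl
      (fun (acc : PySem.Dict Int (List (Int × Int))) q => (q.2.foldl (pvIdleStep q.1) (0, acc)).2) it0
    with hitF
  have hnd : jbm.keys.Nodup := pvGroup_nodup jtD ps PySem.Dict.empty PySem.Dict.nodup_keys_empty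
  have hkeysS : itemsS.map (fun x => x.1) = jbm.keys := by
    rw [hitemsS, List.map_map]; rfl
  have hndS : (itemsS.map (fun x => x.1)).Nodup := by rw [hkeysS]; exact hnd
  have hkeys0 : it0.keys = itemsS.map (fun x => x.1) := by
    rw [hit0]
    show (itemsS.map (fun q => (q.1, ([] : List (Int × Int))))).map (fun x => x.1) = _
    rw [List.map_map]; rfl
  have hinit : ∀ q ∈ itemsS, it0.getD q.1 [] = [] ∧ it0.contains q.1 = true := by
    intro q hq
    have hmem : (q.1, ([] : List (Int × Int))) ∈ it0.items := by
      rw [hit0]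
      exact List.mem_map.mpr ⟨q, hq, rfl⟩
    have hnd0 : it0.keys.Nodup := by rw [hkeys0]; exact hndS
    have hget : it0.get? q.1 = some [] := PySem.Dict.get?_of_mem_items it0 hmem hnd0
    refine ⟨?_, ?_⟩
    · rw [PySem.Dict.getD_eq_get?_getD, hget]; rfl
    · rw [PySem.Dict.contains_iff_mem_keys, hkeys0]
      exact List.mem_map.mpr ⟨q, hq, rfl⟩
  have hcont0 : ∀ q ∈ itemsS, it0.contains q.1 = true := fun q hq => (hinit q hq).2
  have hkeysF : itF.keys = it0.keys := by
    rw [hitF]; exact pvOuterA_keys itemsS it0 hcont0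
  have hndF : itF.keys.Nodup := by rw [hkeysF, hkeys0]; exact hndS
  have hgetD : ∀ q ∈ itemsS, itF.getD q.1 [] = pvAScan 0 q.2 := by
    intro q hq
    rw [hitF]
    exact pvOuterA_getD itemsS it0 hndS hinit q hq
  have hndB : (jbm.items.map (fun x => x.1)).Nodup := hnd
  have hfreshB : ∀ q ∈ jbm.items,
      (PySem.Dict.empty : PySem.Dict Int (List (Int × Int))).contains q.1 = false :=
    fun q _ => PySem.Dict.contains_empty q.1
  calc itF.items
      = itF.keys.map (fun k => (k, itF.getD k [])) := PySem.Dict.items_eq_map_keys itF hndF []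
    _ = (itemsS.map (fun x => x.1)).map (fun k => (k, itF.getD k [])) := by rw [hkeysF, hkeys0]
    _ = itemsS.map (fun q => (q.1, itF.getD q.1 [])) := by rw [List.map_map]; rfl
    _ = itemsS.map (fun q => (q.1, pvAScan 0 q.2)) :=
        List.map_congr_left (fun q hq => by rw [hgetD q hq])
    _ = jbm.items.map (fun q => (q.1, pvAScan 0 (PySem.List.sorted q.2 pvKey false))) := by
        rw [hitemsS, List.map_map]; rfl
    _ = jbm.items.map (fun q => (q.1, pvGaps (pvBlocks (PySem.List.sorted q.2 pvKey false)))) :=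
        List.map_congr_left (fun q _ => by rw [pvGaps_pvBlocks])
    _ = (jbm.items.foldl
          (fun (acc : PySem.Dict Int (List (Int × Int))) q =>
            acc.insert q.1 (pvGaps (pvBlocks (PySem.List.sorted q.2 pvKey false)))) PySem.Dict.empty).items := by
        rw [pvInsertFold_items (fun q => pvGaps (pvBlocks (PySem.List.sorted q.2 pvKey false)))
          jbm.items PySem.Dict.empty hndB hfreshB]
        simp [show (PySem.Dict.empty : PySem.Dict Int (List (Int × Int))).items = [] from rfl]

-- ===== VERDICT (by name: the statement is the Claim_ definition above) =====
set_option maxHeartbeats 1000000 in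
theorem calculate_idle_times_spec : Claim_equal_calculate_idle_times := by
  intro job_times machine_assignments _ _
  show calculate_idle_times job_times machine_assignments
      = calculate_idle_times_alt job_times machine_assignments
  exact pvMain (PySem.Dict.ofList (job_times.map (fun p => (p.1, PySem.Dict.ofList p.2))))
    ((PySem.Dict.ofList machine_assignments).items)
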